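-- pv_equiv track=rewrite | github.com/MEHDI342/CUDAM | parser/ast.py | _is_sequential_access
-- ===== SOURCE A (Python) =====
-- from typing import List, Dict, Any, Optional, Union, Set, Tuple
-- from typing import List, Dict, Any, Optional, Set, Tuple
-- from typing import List, Dict, Any, Optional, Set, Tuple
--
-- def _is_sequential_access(access_pattern: List[Dict[str, Any]]) -> bool:
--     """Check if memory access pattern is sequential"""
--     if not access_pattern:
--         return False
--
--     expected_idx = access_pattern[0]['index']
--     for access in access_pattern[1:]:
--         if access['index'] != expected_idx + 1:
--             return False
--         expected_idx = access['index']
--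
--     return True
-- ===== SOURCE B (Python) =====
-- def _is_sequential_access(access_pattern):
--     if not access_pattern:
--         return False
--     idxs = [a['index'] for a in access_pattern]
--     return idxs == list(range(idxs[0], idxs[0] + len(idxs)))
-- ===== Notes on version B (the rewrite author's own statement) =====
-- stated objective: simpler
-- what changed: Replaces the stepwise loop tracking expected_idx with extracting all indices once and comparing the whole list against the arithmetic run range(first, first+len) in one shot.
-- outside the precondition, e.g. on _is_sequential_access([{'index': 0}, {'index': 5}, {}]): A returns False, B raises KeyError
import Mathlib
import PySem

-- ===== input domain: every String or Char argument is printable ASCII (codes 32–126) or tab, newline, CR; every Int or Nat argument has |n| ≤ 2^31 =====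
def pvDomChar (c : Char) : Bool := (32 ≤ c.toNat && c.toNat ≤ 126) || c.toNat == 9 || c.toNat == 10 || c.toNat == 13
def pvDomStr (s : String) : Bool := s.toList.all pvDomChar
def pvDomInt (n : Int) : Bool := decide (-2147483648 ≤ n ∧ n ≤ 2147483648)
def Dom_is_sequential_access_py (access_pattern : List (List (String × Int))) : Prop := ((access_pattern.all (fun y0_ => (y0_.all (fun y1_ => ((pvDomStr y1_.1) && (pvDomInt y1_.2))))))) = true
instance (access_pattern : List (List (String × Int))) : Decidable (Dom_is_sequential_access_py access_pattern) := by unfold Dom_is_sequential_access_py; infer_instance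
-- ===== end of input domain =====

-- B checks contiguity by one whole-list comparison against the expected arithmetic run
-- instead of A's stepwise expected_idx loop (objective: simpler).

-- ===== PORT A =====
-- dict lookup d['index']: first match in the association list; Pre_ guarantees the key
-- is present in every dict, so the .getD 0 default is never taken inside Pre_.
def pvIdx (d : List (String × Int)) : Int := (List.lookup "index" d).getD 0

-- the for-loop over access_pattern[1:], carrying expected_idx
def pvGoA (e : Int) : List (List (String × Int)) → Bool
  | [] => true
  | d :: rest => if pvIdx d ≠ e + 1 then false else pvGoA (pvIdx d) rest

def is_sequential_access_py (access_pattern : List (List (String × Int))) : Bool :=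
  match access_pattern with
  | [] => false
  | d0 :: rest => pvGoA (pvIdx d0) rest

-- ===== PORT B =====
def is_sequential_access_py_alt (access_pattern : List (List (String × Int))) : Bool :=
  match access_pattern with
  | [] => false
  | d0 :: rest =>
    let idxs := (d0 :: rest).map pvIdx
    let i0 := idxs.head!
    decide (idxs = PySem.List.pyRange i0 (i0 + (idxs.length : Int)) 1)

-- ===== PRECONDITION & SPEC =====
-- Pre_ excludes patterns in which some dict lacks the key 'index': Python A raises
-- KeyError on the first such dict it reaches (and may instead return False if the scan
-- stops earlier, where B would raise while extracting all indices — that is why those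
-- inputs are excluded too).
def Pre_is_sequential_access_py (access_pattern : List (List (String × Int))) : Prop :=
  (access_pattern.all (fun d => d.any (fun p => p.1 == "index"))) = true
instance (access_pattern : List (List (String × Int))) : Decidable (Pre_is_sequential_access_py access_pattern) := by unfold Pre_is_sequential_access_py; infer_instance

def pvWitness_is_sequential_access_py : (List (List (String × Int))) := [[("index", 0)], [("index", 1)]]

def Spec_is_sequential_access_py (access_pattern : List (List (String × Int))) (out : Bool) : Prop := out = is_sequential_access_py_alt access_pattern
instance (access_pattern : List (List (String × Int))) (out : Bool) : Decidable (Spec_is_sequential_access_py access_pattern out) := by unfold Spec_is_sequential_access_py; infer_instance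

-- ===== CLAIM (what is proved, stated in full; the proofs are below) =====
def Claim_equal_is_sequential_access_py : Prop := ∀ (access_pattern : List (List (String × Int))), Dom_is_sequential_access_py access_pattern → Pre_is_sequential_access_py access_pattern → Spec_is_sequential_access_py access_pattern (is_sequential_access_py access_pattern)

-- ===== LEMMAS AND PROOFS =====

-- A's loop with expected value e equals the one-shot comparison of the remaining
-- indices against the run starting at e+1.
theorem pvGoA_eq (l : List (List (String × Int))) : ∀ (e : Int),
    pvGoA e l = decide (l.map pvIdx = PySem.List.pyRange (e + 1) (e + 1 + (l.length : Int)) 1) := by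
  induction l with
  | nil =>
      intro e
      rw [PySem.List.pyRange_one_eq_nil (by simp)]
      simp [pvGoA]
  | cons d t ih =>
      intro e
      have hlt : e + 1 < e + 1 + ((d :: t).length : Int) := by
        simp only [List.length_cons]; omega
      rw [PySem.List.pyRange_one_cons hlt]
      by_cases h : pvIdx d = e + 1
      · simp [pvGoA, h, ih (e + 1)]
        rw [show e + 1 + ((t.length : Int) + 1) = e + 1 + 1 + (t.length : Int) from by omega]
      · simp [pvGoA, h]

theorem is_sequential_access_py_eq_alt (access_pattern : List (List (String × Int))) :
    is_sequential_access_py access_pattern = is_sequential_access_py_alt access_pattern := by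
  cases access_pattern with
  | nil => rfl
  | cons d0 rest =>
      show pvGoA (pvIdx d0) rest = _
      unfold is_sequential_access_py_alt
      simp only [List.map_cons, List.head!, List.length_cons, List.length_map]
      have hlt : pvIdx d0 < pvIdx d0 + ((rest.length + 1 : Nat) : Int) := by
        push_cast; omega
      rw [PySem.List.pyRange_one_cons hlt]
      have harith : pvIdx d0 + ((rest.length + 1 : Nat) : Int) = pvIdx d0 + 1 + (rest.length : Int) := by
        push_cast; omega
      rw [harith, pvGoA_eq rest (pvIdx d0)]
      simp

-- ===== VERDICT (by name: the statement is the Claim_ definition above) =====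
theorem is_sequential_access_py_spec : Claim_equal_is_sequential_access_py := by
  intro ap _ _
  exact is_sequential_access_py_eq_alt ap
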